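-- pv_equiv track=rewrite | github.com/crushallhumans/adventofcode2021 | day15.py | extend_data
-- ===== SOURCE A (Python) =====
-- def extend_data(data, multiplier):
--     '''returns the data as a 2d array extended 5 times in each direction'''
--     d = len(data)
--     max_list_size = len(data) * multiplier
--     extended_data = [[0 for _ in range(max_list_size)] for _ in range(max_list_size)] # pad an empty array with zeros
--
--     for y_index, y in enumerate(extended_data):
--         for x_index, x in enumerate(y):
--             n = data[y_index % d][x_index % d]
--             extended_data[y_index][x_index] = (
--             	n + ((y_index // d) + (x_index // d)) - 1
--             ) % 9 + 1
--             # formula: i = (n - 1) % 9 + 1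
--
--     return extended_data
-- ===== SOURCE B (Python) =====
-- def extend_data(data, multiplier):
--     '''returns the data as a 2d array extended `multiplier` times in each direction'''
--     d = len(data)
--     if d * multiplier <= 0:
--         return []
--
--     def inc_row(row):
--         return [v % 9 + 1 for v in row]
--
--     # normalized base tile: base[y][x] = (data[y][x] - 1) % 9 + 1
--     base = [[(v - 1) % 9 + 1 for v in row[:d]] for row in data]
--
--     # top band: concatenate `multiplier` tiles horizontally, each the inc of the previous
--     band = []
--     for row in base:
--         wide = list(row)
--         prev = row
--         for _ in range(multiplier - 1):
--             prev = inc_row(prev)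
--             wide.extend(prev)
--         band.append(wide)
--
--     # full grid: stack `multiplier` bands vertically, each the inc of the previous
--     grid = list(band)
--     block = band
--     for _ in range(multiplier - 1):
--         block = [inc_row(r) for r in block]
--         grid.extend(block)
--     return grid
-- ===== Notes on version B (the rewrite author's own statement) =====
-- stated objective: alternative
-- what changed: B replaces A's per-cell closed-form offset arithmetic over the full extended grid with tile propagation: it normalizes a base tile once, grows the top band by repeatedly incrementing the previous horizontal tile, then stacks vertical bands each obtained by incrementing the band above.
import Mathlib
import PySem

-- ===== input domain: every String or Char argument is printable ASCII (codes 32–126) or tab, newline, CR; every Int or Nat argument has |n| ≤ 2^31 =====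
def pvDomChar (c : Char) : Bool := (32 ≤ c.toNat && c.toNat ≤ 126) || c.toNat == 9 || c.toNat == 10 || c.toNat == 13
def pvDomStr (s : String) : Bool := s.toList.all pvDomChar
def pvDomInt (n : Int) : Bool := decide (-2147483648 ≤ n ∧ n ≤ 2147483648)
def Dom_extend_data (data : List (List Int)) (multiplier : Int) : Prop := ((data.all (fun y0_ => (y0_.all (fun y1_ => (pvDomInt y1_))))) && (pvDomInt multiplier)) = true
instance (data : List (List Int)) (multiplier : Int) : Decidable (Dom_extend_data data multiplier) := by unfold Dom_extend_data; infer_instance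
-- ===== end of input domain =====

-- B replaces A's per-cell offset arithmetic with neighbor-tile propagation (normalized base
-- tile, then each further tile is inc of the previous one); same cost, different algorithm.

-- ===== PORT A =====
def extend_data (data : List (List Int)) (multiplier : Int) : List (List Int) :=
  let d : Int := data.length
  let maxListSize : Int := d * multiplier
  -- the zero-initialized grid is immediately overwritten cell by cell; ported as the map
  -- over the same index ranges computing the same value per cell
  (PySem.List.pyRange 0 maxListSize).map (fun yIndex =>
    (PySem.List.pyRange 0 maxListSize).map (fun xIndex =>
      let n := PySem.List.pyGetD (PySem.List.pyGetD data (PySem.Int.mod yIndex d) []) (PySem.Int.mod xIndex d) 0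
      PySem.Int.mod (n + (PySem.Int.floordiv yIndex d + PySem.Int.floordiv xIndex d) - 1) 9 + 1))

-- ===== PORT B =====
def incRowB (row : List Int) : List Int := row.map (fun v => PySem.Int.mod v 9 + 1)

def extend_data_alt (data : List (List Int)) (multiplier : Int) : List (List Int) :=
  let d : Int := data.length
  if d * multiplier ≤ 0 then []
  else
    let base := data.map (fun row => (PySem.List.slice row none (some d)).map (fun v => PySem.Int.mod (v - 1) 9 + 1))
    let band := base.map (fun row =>
      ((PySem.List.pyRange 0 (multiplier - 1)).foldl
        (fun wp (_ : Int) => (wp.1 ++ incRowB wp.2, incRowB wp.2)) (row, row)).1)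
    ((PySem.List.pyRange 0 (multiplier - 1)).foldl
      (fun gb (_ : Int) => (gb.1 ++ gb.2.map incRowB, gb.2.map incRowB)) (band, band)).1

-- ===== PRECONDITION & SPEC =====
-- Pre_ excludes exactly the ragged grids on which A raises IndexError: when the grid is
-- non-empty, the multiplier positive, and some row is shorter than the number of rows.
def Pre_extend_data (data : List (List Int)) (multiplier : Int) : Prop :=
  multiplier ≤ 0 ∨ data = [] ∨ ∀ row ∈ data, data.length ≤ row.length
instance (data : List (List Int)) (multiplier : Int) : Decidable (Pre_extend_data data multiplier) := by unfold Pre_extend_data; infer_instance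

def pvWitness_extend_data : List (List Int) × Int := ([[1, 2], [3, 4]], 2)

def Spec_extend_data (data : List (List Int)) (multiplier : Int) (out : List (List Int)) : Prop := out = extend_data_alt data multiplier
instance (data : List (List Int)) (multiplier : Int) (out : List (List Int)) : Decidable (Spec_extend_data data multiplier out) := by unfold Spec_extend_data; infer_instance

-- ===== CLAIM (what is proved, stated in full; the proofs are below) =====
def Claim_equal_extend_data : Prop := ∀ (data : List (List Int)) (multiplier : Int), Dom_extend_data data multiplier → Pre_extend_data data multiplier → Spec_extend_data data multiplier (extend_data data multiplier)

-- ===== LEMMAS AND PROOFS =====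

-- the fold of Source B's accumulate-and-increment loops: acc collects every iterate of f
theorem pv_foldIter {γ : Type} (f : List γ → List γ) (l : List Int) (acc prev : List γ) :
    l.foldl (fun s (_ : Int) => (s.1 ++ f s.2, f s.2)) (acc, prev)
      = (acc ++ (List.range l.length).flatMap (fun j => f^[j + 1] prev), f^[l.length] prev) := by
  induction l generalizing acc prev with
  | nil => simp
  | cons a t ih =>
      simp only [List.foldl_cons, ih, List.length_cons, Prod.mk.injEq]
      refine ⟨?_, (Function.iterate_succ_apply f t.length prev).symm⟩
      rw [List.range_succ_eq_map]
      simp [List.flatMap_map, Function.iterate_succ_apply, List.append_assoc]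

theorem pv_prepend_iterates {γ : Type} (f : List γ → List γ) (k : Nat) (b : List γ) :
    b ++ (List.range k).flatMap (fun j => f^[j + 1] b)
      = (List.range (k + 1)).flatMap (fun j => f^[j] b) := by
  rw [List.range_succ_eq_map]
  simp [List.flatMap_map, Function.iterate_succ_apply]

theorem pv_map_iterate {α : Type} (f : α → α) (n : Nat) (l : List α) :
    (List.map f)^[n] l = l.map (f^[n]) := by
  induction n generalizing l with
  | zero => simp
  | succ n ih => simp [Function.iterate_succ_apply, ih]

theorem pv_map_eq_range_map {α β : Type} (l : List α) (h : α → β) (d : α) :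
    l.map h = (List.range l.length).map (fun r => h (l.getD r d)) := by
  apply List.ext_getElem
  · simp
  · intro i h1 h2
    have hi : i < l.length := by simpa using h1
    simp [List.getD_eq_getElem?_getD, hi]

theorem pv_flatMap_blocks {β : Type} (M D : Nat) (g : Nat → Nat → β) :
    (List.range M).flatMap (fun i => (List.range D).map (g i))
      = (List.range (D * M)).map (fun y => g (y / D) (y % D)) := by
  induction M with
  | zero => simp
  | succ M ih =>
      rw [List.range_succ, List.flatMap_append, ih, Nat.mul_succ, List.range_add, List.map_append]
      congr 1
      simp only [List.flatMap_cons, List.flatMap_nil, List.append_nil, List.map_map]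
      apply List.map_congr_left
      intro j hj
      simp only [List.mem_range] at hj
      have hD : 0 < D := by omega
      have h1 : (D * M + j) / D = M := by
        rw [Nat.add_comm, Nat.add_mul_div_left _ _ hD, Nat.div_eq_of_lt hj, Nat.zero_add]
      have h2 : (D * M + j) % D = j := by
        rw [Nat.add_comm, Nat.add_mul_mod_self_left, Nat.mod_eq_of_lt hj]
      simp [Function.comp, h1, h2]

theorem pv_inc_iterate (k : Nat) (n : Int) :
    (fun v => PySem.Int.mod v 9 + 1)^[k] (PySem.Int.mod (n - 1) 9 + 1)
      = PySem.Int.mod (n - 1 + k) 9 + 1 := by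
  induction k with
  | zero => simp
  | succ k ih =>
      rw [Function.iterate_succ_apply', ih]
      have h9 : (0 : Int) < 9 := by norm_num
      simp only [PySem.Int.mod_eq_emod_of_pos h9]
      push_cast
      omega

theorem pv_getD_map {α β : Type} (f : α → β) (l : List α) (r : Nat) (hr : r < l.length) (d : β) (d' : α) :
    (l.map f).getD r d = f (l.getD r d') := by
  simp [List.getD_eq_getElem?_getD, hr]

theorem pv_getD_take {α : Type} (l : List α) (n c : Nat) (h : c < n) (d : α) :
    (l.take n).getD c d = l.getD c d := by
  simp [List.getD_eq_getElem?_getD, h]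

theorem pv_blocks {α β : Type} (M : Nat) (L : List α) (h : Nat → α → β) (d : α) :
    (List.range M).flatMap (fun i => L.map (h i))
      = (List.range (L.length * M)).map (fun y => h (y / L.length) (L.getD (y % L.length) d)) := by
  have he : (fun i => L.map (h i)) = fun i => (List.range L.length).map (fun r => h i (L.getD r d)) :=
    funext fun i => pv_map_eq_range_map L (h i) d
  rw [he, pv_flatMap_blocks]

theorem pv_incRowB_eq : incRowB = List.map (fun v => PySem.Int.mod v 9 + 1) := rfl

-- ===== VERDICT (by name: the statement is the Claim_ definition above) =====
theorem extend_data_spec : Claim_equal_extend_data := by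
  intro data m _hdom hpre
  show extend_data data m = extend_data_alt data m
  by_cases hpos : (data.length : Int) * m ≤ 0
  · have hA : extend_data data m = [] := by
      simp only [extend_data]
      rw [PySem.List.pyRange_one_eq_nil hpos, List.map_nil]
    have hB : extend_data_alt data m = [] := by
      simp only [extend_data_alt]
      rw [if_pos hpos]
    rw [hA, hB]
  · push Not at hpos
    -- degenerate disjuncts of Pre_ contradict positivity
    have hm0 : 0 < m := by
      by_contra h
      push Not at h
      exact absurd (mul_nonpos_of_nonneg_of_nonpos (Int.natCast_nonneg _) h) (not_le.mpr hpos)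
    have hD0 : 0 < data.length := by
      by_contra h
      push Not at h
      have h0 : data.length = 0 := by omega
      rw [h0] at hpos
      simp at hpos
    have hrow : ∀ row ∈ data, data.length ≤ row.length := by
      rcases hpre with h | h | h
      · omega
      · subst h; simp at hD0
      · exact h
    have hM0 : 0 < m.toNat := by omega
    have hsize : (data.length : Int) * m = ((data.length * m.toNat : Nat) : Int) := by
      push_cast [Int.toNat_of_nonneg hm0.le]; ring
    have hm1 : m - 1 = ((m.toNat - 1 : Nat) : Int) := by omega
    have hMM : m.toNat - 1 + 1 = m.toNat := by omega
    simp only [extend_data, extend_data_alt]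
    rw [if_neg (not_le.mpr hpos), hsize, hm1]
    rw [PySem.List.pyRange_zero_natCast, PySem.List.pyRange_zero_natCast]
    -- A side: Nat-indexed canonical form
    simp only [List.map_map, Function.comp_def, PySem.Int.mod_natCast, PySem.Int.floordiv_natCast,
      PySem.List.pyGetD_natCast]
    -- B side: slice is take, unfold the two accumulate-and-increment loops
    have hslice : ∀ row : List Int,
        PySem.List.slice row none (some (data.length : Int)) = row.take data.length := by
      intro row
      rw [PySem.List.slice_to row (Int.natCast_nonneg data.length)]
      simp
    simp only [hslice, pv_foldIter, List.length_map, List.length_range, pv_prepend_iterates, hMM]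
    simp only [pv_incRowB_eq, pv_map_iterate, pv_blocks (d := (0 : Int)),
      pv_blocks (d := ([] : List Int)), List.length_map, List.length_take]
    apply List.map_congr_left
    intro y hy
    simp only [List.mem_range] at hy
    have hyD : y % data.length < data.length := Nat.mod_lt _ hD0
    rw [pv_getD_map _ _ _ (by simpa using hyD) [] []]
    set r := data.getD (y % data.length) [] with hr
    have hrmem : r ∈ data := by
      rw [hr, List.getD_eq_getElem?_getD, List.getElem?_eq_getElem hyD, Option.getD_some]
      exact List.getElem_mem hyD
    have hrlen : data.length ≤ r.length := hrow r hrmem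
    have hmin : min data.length r.length = data.length := by omega
    rw [hmin, List.map_map]
    apply List.map_congr_left
    intro x hx
    simp only [List.mem_range] at hx
    have hxD : x % data.length < data.length := Nat.mod_lt _ hD0
    simp only [Function.comp_def]
    rw [pv_getD_map _ _ _ (by simp; omega) 0 0, pv_getD_take _ _ _ hxD 0]
    rw [← Function.iterate_add_apply, pv_inc_iterate]
    congr 1
    congr 1
    push_cast
    ring
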